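-- pv_equiv track=rewrite | github.com/jieuncodes/CodeCrushers | 지은/ala/q1-2.py | solution
-- ===== SOURCE A (Python) =====
-- def solution(n, edges, blackouts):
--     parent = [i for i in range(n+1)]
--
--     def find(x):
--         if parent[x] != x:
--             parent[x] = find(parent[x])
--         return parent[x]
--
--     def union(x, y):
--         rootX = find(x)
--         rootY = find(y)
--         if rootX != rootY:
--             parent[rootY] = rootX
--
--     for u, v in edges:
--         if u not in blackouts and v not in blackouts:
--             union(u, v)
--
--     direct_connections = sum(1 for u, v in edges if (u == 1 and v in blackouts) or (v == 1 and u in blackouts))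
--
--     indirect_connections = sum(1 for u in blackouts if find(u) == 1)
--
--     min_faults = direct_connections
--     max_faults = direct_connections + indirect_connections
--
--     return [min_faults, max_faults]
-- ===== SOURCE B (Python) =====
-- def solution(n, edges, blackouts):
--     # Component label per node: label[x] is the representative of x's component.
--     # Each union eagerly relabels the absorbed component, so no find/recursion is needed.
--     comp = list(range(n + 1))
--     for u, v in edges:
--         if u not in blackouts and v not in blackouts:
--             ru, rv = comp[u], comp[v]
--             if ru != rv:
--                 comp = [ru if c == rv else c for c in comp]
--     direct = sum(1 for u, v in edges if (u == 1 and v in blackouts) or (v == 1 and u in blackouts))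
--     indirect = sum(1 for u in blackouts if comp[u] == 1)
--     return [direct, direct + indirect]
-- ===== Notes on version B (the rewrite author's own statement) =====
-- stated objective: alternative
-- what changed: Replaces the recursive path-compressing union-find (lazy find with parent-array mutation) by a flat component-label array that is eagerly relabelled at each union, so no recursion or find is needed when counting.
import Mathlib
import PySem

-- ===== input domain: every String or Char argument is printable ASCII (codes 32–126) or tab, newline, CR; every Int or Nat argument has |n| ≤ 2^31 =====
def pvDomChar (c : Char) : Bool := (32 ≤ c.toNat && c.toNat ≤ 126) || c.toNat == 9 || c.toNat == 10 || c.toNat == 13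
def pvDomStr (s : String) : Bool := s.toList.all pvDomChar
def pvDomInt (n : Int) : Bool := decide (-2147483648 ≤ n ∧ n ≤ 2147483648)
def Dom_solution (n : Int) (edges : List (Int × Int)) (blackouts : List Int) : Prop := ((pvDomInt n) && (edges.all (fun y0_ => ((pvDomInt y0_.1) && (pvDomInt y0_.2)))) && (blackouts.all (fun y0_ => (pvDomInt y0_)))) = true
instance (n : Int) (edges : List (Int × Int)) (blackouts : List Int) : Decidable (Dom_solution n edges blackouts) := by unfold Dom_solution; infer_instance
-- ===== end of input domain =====

-- B replaces A's recursive path-compressing union-find by a flat component-label array,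
-- eagerly relabelling the absorbed component at each union (no recursion, no find).

-- ===== PORT A =====
-- find(x) with path compression; the fuel argument only makes the recursion structural
-- (chosen large enough under Pre_); none = IndexError from parent[x] (or fuel exhaustion,
-- which Pre_ rules out).
def pvFindA (parent : List Int) (x : Int) : Nat → Option (List Int × Int)
  | 0 => none
  | (fuel+1) =>
    match PySem.List.pyGet? parent x with
    | none => none
    | some px =>
      if px ≠ x then
        match pvFindA parent px fuel with
        | none => none
        | some pr =>
          match PySem.List.pySet? pr.1 x pr.2 with
          | none => none
          | some p2 => some (p2, pr.2)
      else some (parent, px)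

def pvUnionA (fuel : Nat) (parent : List Int) (x y : Int) : Option (List Int) :=
  match pvFindA parent x fuel with
  | none => none
  | some pr =>
    match pvFindA pr.1 y fuel with
    | none => none
    | some qr =>
      if pr.2 ≠ qr.2 then PySem.List.pySet? qr.1 qr.2 pr.2 else some qr.1

def pvStepU (fuel : Nat) (blackouts : List Int) (acc : Option (List Int)) (uv : Int × Int) : Option (List Int) :=
  match acc with
  | none => none
  | some p => if uv.1 ∉ blackouts ∧ uv.2 ∉ blackouts then pvUnionA fuel p uv.1 uv.2 else some p

def pvStepB (fuel : Nat) (st : Option (List Int × Int)) (u : Int) : Option (List Int × Int) :=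
  match st with
  | none => none
  | some pc =>
    match pvFindA pc.1 u fuel with
    | none => none
    | some pr => some (pr.1, pc.2 + (if pr.2 = 1 then (1:Int) else 0))

def solution (n : Int) (edges : List (Int × Int)) (blackouts : List Int) : List Int :=
  let parent : List Int := PySem.List.pyRange 0 (n+1) 1
  let fuel : Nat := parent.length + edges.length + 1
  match edges.foldl (pvStepU fuel blackouts) (some parent) with
  | none => []   -- a union raised IndexError (excluded by Pre_)
  | some p =>
    let direct : Int := edges.foldl
      (fun acc uv => if (uv.1 = 1 ∧ uv.2 ∈ blackouts) ∨ (uv.2 = 1 ∧ uv.1 ∈ blackouts) then acc + 1 else acc) 0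
    match blackouts.foldl (pvStepB fuel) (some (p, 0)) with
    | none => []   -- find on a blackout raised IndexError (excluded by Pre_)
    | some pc => [direct, direct + pc.2]

-- ===== PORT B =====
-- comp[u] is ported with PySem.List.pyGet?; none = IndexError (excluded by Pre_).
def pvStepUB (blackouts : List Int) (acc : Option (List Int)) (uv : Int × Int) : Option (List Int) :=
  match acc with
  | none => none
  | some comp =>
    if uv.1 ∉ blackouts ∧ uv.2 ∉ blackouts then
      match PySem.List.pyGet? comp uv.1, PySem.List.pyGet? comp uv.2 with
      | some ru, some rv =>
        if ru ≠ rv then some (comp.map (fun c => if c = rv then ru else c)) else some comp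
      | _, _ => none
    else some comp

def pvStepBB (comp : List Int) (acc : Option Int) (u : Int) : Option Int :=
  match acc with
  | none => none
  | some c =>
    match PySem.List.pyGet? comp u with
    | some cu => some (if cu = 1 then c + 1 else c)
    | none => none

def solution_alt (n : Int) (edges : List (Int × Int)) (blackouts : List Int) : List Int :=
  let comp0 : List Int := PySem.List.pyRange 0 (n+1) 1
  match edges.foldl (pvStepUB blackouts) (some comp0) with
  | none => []   -- comp[u] raised IndexError (excluded by Pre_)
  | some comp =>
    let direct : Int := edges.foldl
      (fun acc uv => if (uv.1 = 1 ∧ uv.2 ∈ blackouts) ∨ (uv.2 = 1 ∧ uv.1 ∈ blackouts) then acc + 1 else acc) 0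
    match blackouts.foldl (pvStepBB comp) (some 0) with
    | none => []   -- comp[u] raised IndexError (excluded by Pre_)
    | some ind => [direct, direct + ind]

-- ===== PRECONDITION & SPEC =====
-- Pre_ is exactly A's returning domain: A raises IndexError iff some blackout id, or some
-- endpoint of an edge that passes the union guard, lies outside [-(n+1), n] (the valid
-- Python index range of the parent list of length n+1).
def Pre_solution (n : Int) (edges : List (Int × Int)) (blackouts : List Int) : Prop :=
  (∀ b ∈ blackouts, -(n+1) ≤ b ∧ b ≤ n) ∧
  (∀ uv ∈ edges, uv.1 ∉ blackouts → uv.2 ∉ blackouts →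
    -(n+1) ≤ uv.1 ∧ uv.1 ≤ n ∧ -(n+1) ≤ uv.2 ∧ uv.2 ≤ n)

instance (n : Int) (edges : List (Int × Int)) (blackouts : List Int) : Decidable (Pre_solution n edges blackouts) := by unfold Pre_solution; infer_instance

def pvWitness_solution : Int × (List (Int × Int)) × List Int := (2, [(1, 2)], [2])

def Spec_solution (n : Int) (edges : List (Int × Int)) (blackouts : List Int) (out : List Int) : Prop := out = solution_alt n edges blackouts
instance (n : Int) (edges : List (Int × Int)) (blackouts : List Int) (out : List Int) : Decidable (Spec_solution n edges blackouts out) := by unfold Spec_solution; infer_instance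

-- ===== CLAIM (what is proved, stated in full; the proofs are below) =====
def Claim_equal_solution : Prop := ∀ (n : Int) (edges : List (Int × Int)) (blackouts : List Int), Dom_solution n edges blackouts → Pre_solution n edges blackouts → Spec_solution n edges blackouts (solution n edges blackouts)

-- ===== LEMMAS AND PROOFS =====

-- reading a parent/label array at an (already wrapped) cell index
def pvGet (P : List Int) (x : Int) : Int := P.getD x.toNat 0
def pvInRange (P : List Int) (x : Int) : Prop := 0 ≤ x ∧ x < P.length
-- Python's wrapped index: a raw id x in [-L, L) denotes cell pvW L x of a list of length L
def pvW (L : Nat) (x : Int) : Int := if x < 0 then x + L else x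
-- invariant: cell values stay in range
def pvInv (P : List Int) : Prop := ∀ x, pvInRange P x → pvInRange P (pvGet P x)
-- C labels every cell with the root of its component: parent links preserve the label,
-- and a root is labelled by itself (so find returns exactly C of its wrapped argument)
def pvLab (P : List Int) (C : Int → Int) : Prop :=
  (∀ x, pvInRange P x → C (pvGet P x) = C x) ∧
  (∀ x, pvInRange P x → pvGet P x = x → C x = x)
-- depth certificate: d decreases strictly along parent links (bounds find's recursion)
def pvDec (P : List Int) (d : Int → Nat) : Prop :=
  ∀ x, pvInRange P x → pvGet P x ≠ x → d (pvGet P x) < d x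

lemma pvGetD_eq (P : List Int) (i : Nat) (h : i < P.length) : P[i]? = some (P.getD i 0) := by
  simp [List.getD_eq_getElem?_getD, List.getElem?_eq_getElem h]

lemma pvGet?_eq (P : List Int) (x : Int) (h : pvInRange P x) :
    PySem.List.pyGet? P x = some (pvGet P x) := by
  obtain ⟨h0, h1⟩ := h
  have hx : x = ((x.toNat : Nat) : Int) := (Int.toNat_of_nonneg h0).symm
  have hlt : x.toNat < P.length := by omega
  rw [hx, PySem.List.pyGet?_natCast]
  unfold pvGet
  rw [Int.toNat_natCast]
  exact pvGetD_eq P x.toNat hlt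

lemma pvGet?_neg (P : List Int) (x : Int) (h0 : -(P.length:Int) ≤ x) (h1 : x < 0) :
    PySem.List.pyGet? P x = some (pvGet P (x + P.length)) := by
  have hidx : PySem.List.pyIdx? P.length x = some ((x + P.length).toNat) := by
    unfold PySem.List.pyIdx?
    rw [if_neg (by omega), if_pos (by omega)]
    congr 1
    omega
  unfold PySem.List.pyGet?
  rw [hidx]
  exact pvGetD_eq P _ (by omega)

lemma pvGet?_wrap (P : List Int) (x : Int) (h0 : -(P.length:Int) ≤ x) (h1 : x < P.length) :
    PySem.List.pyGet? P x = some (pvGet P (pvW P.length x)) := by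
  unfold pvW
  by_cases hx : x < 0
  · rw [if_pos hx]; exact pvGet?_neg P x h0 hx
  · rw [if_neg hx]; exact pvGet?_eq P x ⟨by omega, h1⟩

lemma pvSet?_eq (P : List Int) (x : Int) (v : Int) (h : pvInRange P x) :
    PySem.List.pySet? P x v = some (P.set x.toNat v) := by
  obtain ⟨h0, h1⟩ := h
  have hx : x = ((x.toNat : Nat) : Int) := (Int.toNat_of_nonneg h0).symm
  have hlt : x.toNat < P.length := by omega
  rw [hx]
  exact PySem.List.pySet?_natCast P x.toNat v hlt

lemma pvSet?_neg (P : List Int) (x : Int) (v : Int) (h0 : -(P.length:Int) ≤ x) (h1 : x < 0) :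
    PySem.List.pySet? P x v = some (P.set (x + P.length).toNat v) := by
  have hidx : PySem.List.pyIdx? P.length x = some ((x + P.length).toNat) := by
    unfold PySem.List.pyIdx?
    rw [if_neg (by omega), if_pos (by omega)]
    congr 1
    omega
  unfold PySem.List.pySet?
  rw [hidx]
  rfl

lemma pvGet_set_self (P : List Int) (x v : Int) (h : pvInRange P x) :
    pvGet (P.set x.toNat v) x = v := by
  obtain ⟨h0, h1⟩ := h
  have hlt : x.toNat < P.length := by omega
  unfold pvGet
  rw [List.getD_eq_getElem?_getD, List.getElem?_set_self (by simpa using hlt)]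
  simp

lemma pvGet_set_ne (P : List Int) (x y v : Int) (hx : 0 ≤ x) (hy : 0 ≤ y) (hne : y ≠ x) :
    pvGet (P.set x.toNat v) y = pvGet P y := by
  unfold pvGet
  rw [List.getD_eq_getElem?_getD, List.getD_eq_getElem?_getD,
      List.getElem?_set_ne (by omega : x.toNat ≠ y.toNat)]

lemma pvGet_map (P : List Int) (f : Int → Int) (z : Int) (h0 : 0 ≤ z) (h1 : z < P.length) :
    pvGet (P.map f) z = f (pvGet P z) := by
  have hlt : z.toNat < P.length := by omega
  unfold pvGet
  rw [List.getD_eq_getElem?_getD, List.getD_eq_getElem?_getD, List.getElem?_map,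
      List.getElem?_eq_getElem hlt]
  rfl

lemma pvInRange_congr {P1 P : List Int} (hlen : P1.length = P.length) (y : Int) :
    pvInRange P1 y ↔ pvInRange P y := by simp [pvInRange, hlen]

lemma pvLab_ext (P : List Int) (C C' : Int → Int) (hI : pvInv P)
    (h : ∀ z, pvInRange P z → C z = C' z) (hL : pvLab P C) : pvLab P C' := by
  refine ⟨fun x hx => ?_, fun x hx hr => ?_⟩
  · rw [← h x hx, ← h (pvGet P x) (hI x hx)]
    exact hL.1 x hx
  · rw [← h x hx]
    exact hL.2 x hx hr

-- the effect of one write P[w] := r on all three invariants, for a root value r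
lemma pvSet_ok (P : List Int) (C : Int → Int) (d : Int → Nat) (w r : Int)
    (hI : pvInv P) (hL : pvLab P C) (hD : pvDec P d)
    (hw : pvInRange P w) (hr : pvInRange P r) (hroot : pvGet P r = r)
    (hCr : C r = C w) (hd : r ≠ w → d r < d w) (hrw : r = w → C w = w) :
    pvInv (P.set w.toNat r) ∧ pvLab (P.set w.toNat r) C ∧ pvDec (P.set w.toNat r) d ∧
    pvGet (P.set w.toNat r) r = r := by
  have hlen : (P.set w.toNat r).length = P.length := by simp
  have hgw : pvGet (P.set w.toNat r) w = r := pvGet_set_self P w r hw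
  have hgne : ∀ z, 0 ≤ z → z ≠ w → pvGet (P.set w.toNat r) z = pvGet P z :=
    fun z hz hne => pvGet_set_ne P w z r hw.1 hz hne
  refine ⟨?_, ⟨?_, ?_⟩, ?_, ?_⟩
  · intro z hz
    have hzP : pvInRange P z := (pvInRange_congr hlen z).1 hz
    by_cases hzw : z = w
    · subst hzw; rw [hgw]; exact (pvInRange_congr hlen r).2 hr
    · rw [hgne z hzP.1 hzw]; exact (pvInRange_congr hlen _).2 (hI z hzP)
  · intro z hz
    have hzP : pvInRange P z := (pvInRange_congr hlen z).1 hz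
    by_cases hzw : z = w
    · subst hzw; rw [hgw]; exact hCr
    · rw [hgne z hzP.1 hzw]; exact hL.1 z hzP
  · intro z hz hr'
    have hzP : pvInRange P z := (pvInRange_congr hlen z).1 hz
    by_cases hzw : z = w
    · subst hzw
      rw [hgw] at hr'
      exact hr' ▸ hrw hr'
    · rw [hgne z hzP.1 hzw] at hr'
      exact hL.2 z hzP hr'
  · intro z hz hne
    have hzP : pvInRange P z := (pvInRange_congr hlen z).1 hz
    by_cases hzw : z = w
    · subst hzw
      rw [hgw] at hne ⊢
      exact hd (fun h => hne h)
    · rw [hgne z hzP.1 hzw] at hne ⊢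
      exact hD z hzP hne
  · by_cases hrwq : r = w
    · subst hrwq; exact hgw
    · rw [hgne r hr.1 hrwq]; exact hroot

lemma pvFindA_ok (C : Int → Int) : ∀ (fuel : Nat) (P : List Int) (d : Int → Nat) (x : Int),
    pvInv P → pvLab P C → pvDec P d → pvInRange P x → d x < fuel →
    ∃ P' r, pvFindA P x fuel = some (P', r) ∧
      P'.length = P.length ∧ pvInv P' ∧ pvLab P' C ∧ pvDec P' d ∧
      pvInRange P r ∧ pvGet P' r = r ∧ d r ≤ d x ∧ r = C x ∧
      (∀ z, pvInRange P z → pvGet P z = z → pvGet P' z = z) := by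
  intro fuel
  induction fuel with
  | zero => intro P d x _ _ _ _ hf; exact absurd hf (Nat.not_lt_zero _)
  | succ fuel ih =>
    intro P d x hI hL hD hx hf
    have hget := pvGet?_eq P x hx
    by_cases hpe : pvGet P x = x
    · refine ⟨P, x, ?_, rfl, hI, hL, hD, hx, hpe, le_refl _, (hL.2 x hx hpe).symm, fun _ _ h => h⟩
      simp [pvFindA, hget, hpe]
    · have hpxr : pvInRange P (pvGet P x) := hI x hx
      have hdlt : d (pvGet P x) < fuel :=
        lt_of_lt_of_le (hD x hx hpe) (Nat.lt_succ_iff.mp hf)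
      obtain ⟨P1, r, hfind, hlen, hI1, hL1, hD1, hrr, hroot1, hdr, hCr, hroots⟩ :=
        ih P d (pvGet P x) hI hL hD hpxr hdlt
      have hx1 : pvInRange P1 x := (pvInRange_congr hlen x).2 hx
      have hr1 : pvInRange P1 r := (pvInRange_congr hlen r).2 hrr
      have hset := pvSet?_eq P1 x r hx1
      have hCrr : C r = r := hL1.2 r hr1 hroot1
      have hrx : r ≠ x := by
        intro h
        have h1 := lt_of_le_of_lt hdr (hD x hx hpe)
        rw [h] at h1
        exact lt_irrefl _ h1
      obtain ⟨hI2, hL2, hD2, hroot2⟩ :=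
        pvSet_ok P1 C d x r hI1 hL1 hD1 hx1 hr1 hroot1
          (by rw [hCrr, hCr]; exact hL.1 x hx)
          (fun _ => lt_of_le_of_lt hdr (hD x hx hpe))
          (fun h => absurd h hrx)
      have hlen2 : (P1.set x.toNat r).length = P.length := by simp [hlen]
      refine ⟨P1.set x.toNat r, r, ?_, hlen2, hI2, hL2, hD2, hrr, hroot2,
        le_of_lt (lt_of_le_of_lt hdr (hD x hx hpe)), by rw [hCr]; exact hL.1 x hx, ?_⟩
      · simp [pvFindA, hget, hpe, hfind, hset]
      · intro z hz hgz
        have hzx : z ≠ x := fun h => hpe (h ▸ hgz)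
        rw [pvGet_set_ne P1 x z r hx.1 hz.1 hzx]
        exact hroots z hz hgz

lemma pvFindA_raw (C : Int → Int) (fuel : Nat) (P : List Int) (d : Int → Nat) (k : Nat) (x : Int)
    (hI : pvInv P) (hL : pvLab P C) (hD : pvDec P d) (hB : ∀ i, d i ≤ k) (hk : k + 1 < fuel)
    (hx0 : -(P.length:Int) ≤ x) (hx1 : x < P.length) :
    ∃ P' r, pvFindA P x fuel = some (P', r) ∧ P'.length = P.length ∧
      pvInv P' ∧ pvLab P' C ∧ pvDec P' d ∧
      pvInRange P r ∧ pvGet P' r = r ∧ r = C (pvW P.length x) ∧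
      (∀ z, pvInRange P z → pvGet P z = z → pvGet P' z = z) := by
  by_cases hneg : x < 0
  · have hxe : pvInRange P (x + P.length) := ⟨by omega, by omega⟩
    obtain ⟨f, rfl⟩ : ∃ f, fuel = f + 1 := ⟨fuel - 1, by omega⟩
    have hget := pvGet?_neg P x hx0 hneg
    have hpx : pvInRange P (pvGet P (x + P.length)) := hI _ hxe
    have hne : pvGet P (x + P.length) ≠ x := by
      intro h
      have := hpx.1
      omega
    obtain ⟨P1, r, hfind, hlen, hI1, hL1, hD1, hrr, hroot1, hdr, hCr, hroots⟩ :=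
      pvFindA_ok C f P d (pvGet P (x + P.length)) hI hL hD hpx
        (lt_of_le_of_lt (hB _) (by omega))
    have he1 : pvInRange P1 (x + P.length) := (pvInRange_congr hlen _).2 hxe
    have hr1 : pvInRange P1 r := (pvInRange_congr hlen r).2 hrr
    have hCrr : C r = r := hL1.2 r hr1 hroot1
    have hCe : C (pvGet P (x + P.length)) = C (x + P.length) := hL.1 _ hxe
    have hset : PySem.List.pySet? P1 x r = some (P1.set (x + P.length).toNat r) := by
      rw [pvSet?_neg P1 x r (by omega) hneg]
      congr 2
      omega
    obtain ⟨hI2, hL2, hD2, hroot2⟩ :=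
      pvSet_ok P1 C d (x + P.length) r hI1 hL1 hD1 he1 hr1 hroot1
        (by rw [hCrr, hCr]; exact hCe)
        (fun hner => by
          by_cases hpe : pvGet P (x + P.length) = x + P.length
          · exact absurd (by rw [hCr, hpe]; exact hL.2 _ hxe hpe) hner
          · exact lt_of_le_of_lt hdr (hD _ hxe hpe))
        (fun hre => by rw [← hre, hCrr])
    refine ⟨P1.set (x + (P.length:Int)).toNat r, r, ?_, ?_, hI2, hL2, hD2, hrr, hroot2, ?_, ?_⟩
    · simp [pvFindA, hget, hne, hfind, hset]
    · simp [hlen]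
    · rw [hCr]
      unfold pvW
      rw [if_pos hneg]
      exact hCe
    · intro z hz hgz
      by_cases hze : z = x + (P.length:Int)
      · have hpz : pvGet P (x + (P.length:Int)) = x + (P.length:Int) := by
          rw [← hze]; exact hgz
        have hre : r = z := by rw [hCr, hpz, hL.2 _ hxe hpz, hze]
        rw [hze, pvGet_set_self P1 _ r he1, hre, hze]
      · rw [pvGet_set_ne P1 _ z r hxe.1 hz.1 hze]
        exact hroots z hz hgz
  · have hx' : pvInRange P x := ⟨by omega, hx1⟩
    obtain ⟨P', r, hfind, hlen, hI', hL', hD', hrr, hroot', _, hCr, hroots⟩ :=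
      pvFindA_ok C fuel P d x hI hL hD hx' (lt_of_le_of_lt (hB x) (by omega))
    exact ⟨P', r, hfind, hlen, hI', hL', hD', hrr, hroot',
      by rw [hCr]; unfold pvW; rw [if_neg hneg], hroots⟩

-- B's union step in wrapped/total form
def pvGB (L : Nat) (bl : List Int) (comp : List Int) (uv : Int × Int) : List Int :=
  if uv.1 ∉ bl ∧ uv.2 ∉ bl then
    if pvGet comp (pvW L uv.1) ≠ pvGet comp (pvW L uv.2) then
      comp.map (fun c => if c = pvGet comp (pvW L uv.2) then pvGet comp (pvW L uv.1) else c)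
    else comp
  else comp

lemma pvUnionUB_ok (fuel : Nat) (P compB : List Int) (d : Int → Nat) (k : Nat) (u v : Int)
    (hlen : compB.length = P.length)
    (hI : pvInv P) (hL : pvLab P (pvGet compB)) (hD : pvDec P d)
    (hB : ∀ i, d i ≤ k) (hk : k + 1 < fuel)
    (hu0 : -(P.length:Int) ≤ u) (hu1 : u < P.length)
    (hv0 : -(P.length:Int) ≤ v) (hv1 : v < P.length) :
    ∃ P', pvUnionA fuel P u v = some P' ∧ P'.length = P.length ∧ pvInv P' ∧
      (if pvGet compB (pvW P.length u) ≠ pvGet compB (pvW P.length v) then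
         compB.map (fun c => if c = pvGet compB (pvW P.length v) then pvGet compB (pvW P.length u) else c)
       else compB).length = compB.length ∧
      pvLab P' (pvGet (if pvGet compB (pvW P.length u) ≠ pvGet compB (pvW P.length v) then
         compB.map (fun c => if c = pvGet compB (pvW P.length v) then pvGet compB (pvW P.length u) else c)
       else compB)) ∧
      ∃ d', pvDec P' d' ∧ ∀ i, d' i ≤ k + 1 := by
  obtain ⟨P1, rx, hfx, hlen1, hI1, hL1, hD1, hrx, hrootx1, hrxC, hroots1⟩ :=
    pvFindA_raw (pvGet compB) fuel P d k u hI hL hD hB hk hu0 hu1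
  obtain ⟨P2, ry, hfy, hlen2, hI2, hL2, hD2, hry1, hrooty2, hryC, hroots2⟩ :=
    pvFindA_raw (pvGet compB) fuel P1 d k v hI1 hL1 hD1 hB hk (by omega) (by omega)
  have hlen21 : P2.length = P.length := hlen2.trans hlen1
  have hry : pvInRange P ry := (pvInRange_congr hlen1 ry).1 hry1
  have hryC' : ry = pvGet compB (pvW P.length v) := by rw [hryC]; congr 1; unfold pvW; rw [hlen1]
  have hrootx2 : pvGet P2 rx = rx := hroots2 rx ((pvInRange_congr hlen1 rx).2 hrx) hrootx1
  have hrx2 : pvInRange P2 rx := (pvInRange_congr hlen21 rx).2 hrx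
  have hry2 : pvInRange P2 ry := (pvInRange_congr hlen21 ry).2 hry
  have hCrx : pvGet compB rx = rx := hL2.2 rx hrx2 hrootx2
  have hCry : pvGet compB ry = ry := hL2.2 ry hry2 hrooty2
  by_cases hne : rx = ry
  · have hsame : ¬ pvGet compB (pvW P.length u) ≠ pvGet compB (pvW P.length v) := by
      rw [← hrxC, ← hryC']
      simp [hne]
    refine ⟨P2, ?_, hlen21, hI2, ?_, ?_, d, hD2, fun i => le_trans (hB i) (Nat.le_succ k)⟩
    · simp [pvUnionA, hfx, hfy, hne]
    · rw [if_neg hsame]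
    · rw [if_neg hsame]; exact hL2
  · have hdiff : pvGet compB (pvW P.length u) ≠ pvGet compB (pvW P.length v) := by
      rw [← hrxC, ← hryC']
      exact hne
    have hset := pvSet?_eq P2 ry rx hry2
    set C := pvGet compB with hC
    set compB' := compB.map (fun c => if c = pvGet compB (pvW P.length v) then pvGet compB (pvW P.length u) else c) with hcompB'
    set P3 := P2.set ry.toNat rx with hP3
    have hlen3 : P3.length = P.length := by simp [hP3, hlen21]
    have hgy : pvGet P3 ry = rx := pvGet_set_self P2 ry rx hry2
    have hgne : ∀ z, 0 ≤ z → z ≠ ry → pvGet P3 z = pvGet P2 z :=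
      fun z hz hne' => pvGet_set_ne P2 ry z rx hry.1 hz hne'
    have hmapC : ∀ z, pvInRange P3 z → pvGet compB' z = (if C z = ry then rx else C z) := by
      intro z hz
      rw [hcompB', pvGet_map compB _ z hz.1 (by rw [hlen, ← hlen3]; exact hz.2), ← hC,
          ← hrxC, ← hryC']
    refine ⟨P3, ?_, hlen3, ?_, by rw [if_pos hdiff]; simp [hcompB'], ?_, ?_⟩
    · simp [pvUnionA, hfx, hfy, hne, hset]
    · intro z hz
      have hzP : pvInRange P z := (pvInRange_congr hlen3 z).1 hz
      by_cases hzy : z = ry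
      · subst hzy; rw [hgy]; exact (pvInRange_congr hlen3 rx).2 hrx
      · rw [hgne z hzP.1 hzy]
        exact (pvInRange_congr hlen3 _).2 <| (pvInRange_congr hlen21 _).1 <|
          hI2 z ((pvInRange_congr hlen21 z).2 hzP)
    · rw [if_pos hdiff]
      have habs : pvLab P3 (fun z => if C z = ry then rx else C z) := by
        constructor
        · intro z hz
          by_cases hzy : z = ry
          · subst hzy
            rw [hgy]
            simp [hCrx, hCry, hne]
          · rw [hgne z ((pvInRange_congr hlen3 z).1 hz).1 hzy]
            have h1 : C (pvGet P2 z) = C z := hL2.1 z ((pvInRange_congr hlen21 z).2 ((pvInRange_congr hlen3 z).1 hz))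
            simp only [h1]
        · intro z hz hrz
          have hzy : z ≠ ry := by
            intro h
            rw [h, hgy] at hrz
            exact hne hrz
          rw [hgne z ((pvInRange_congr hlen3 z).1 hz).1 hzy] at hrz
          have h2 : C z = z := hL2.2 z ((pvInRange_congr hlen21 z).2 ((pvInRange_congr hlen3 z).1 hz)) hrz
          show (if C z = ry then rx else C z) = z
          rw [h2, if_neg hzy]
      refine pvLab_ext P3 _ _ ?_ (fun z hz => (hmapC z hz).symm) habs
      intro z hz
      have hzP : pvInRange P z := (pvInRange_congr hlen3 z).1 hz
      by_cases hzy : z = ry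
      · subst hzy; rw [hgy]; exact (pvInRange_congr hlen3 rx).2 hrx
      · rw [hgne z hzP.1 hzy]
        exact (pvInRange_congr hlen3 _).2 <| (pvInRange_congr hlen21 _).1 <|
          hI2 z ((pvInRange_congr hlen21 z).2 hzP)
    · refine ⟨fun i => if i = rx then 0 else d i + 1, ?_, ?_⟩
      · intro z hz hgne'
        have hzP : pvInRange P z := (pvInRange_congr hlen3 z).1 hz
        by_cases hzy : z = ry
        · subst hzy
          rw [hgy] at hgne' ⊢
          simp [Ne.symm hne]
        · rw [hgne z hzP.1 hzy] at hgne' ⊢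
          have hzrx : z ≠ rx := by
            intro h; subst h
            exact hgne' hrootx2
          have hd := hD2 z ((pvInRange_congr hlen21 z).2 hzP) hgne'
          by_cases hgrx : pvGet P2 z = rx
          · simp [hgrx, hzrx]
          · simp [hgrx, hzrx]; omega
      · intro i
        by_cases h : i = rx <;> simp [h]
        exact hB i

lemma pvFoldUB_ok (bl : List Int) (fuel L : Nat) :
    ∀ (es : List (Int × Int)) (P compB : List Int) (d : Int → Nat) (k : Nat),
    P.length = L → compB.length = L →
    pvInv P → pvLab P (pvGet compB) → pvDec P d → (∀ i, d i ≤ k) → k + 1 + es.length ≤ fuel →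
    (∀ uv ∈ es, uv.1 ∉ bl → uv.2 ∉ bl →
      -(L:Int) ≤ uv.1 ∧ uv.1 < L ∧ -(L:Int) ≤ uv.2 ∧ uv.2 < L) →
    ∃ P' d' k', es.foldl (pvStepU fuel bl) (some P) = some P' ∧
      P'.length = L ∧ pvInv P' ∧
      (es.foldl (pvGB L bl) compB).length = L ∧
      pvLab P' (pvGet (es.foldl (pvGB L bl) compB)) ∧
      pvDec P' d' ∧ (∀ i, d' i ≤ k') ∧ k' ≤ k + es.length := by
  intro es
  induction es with
  | nil =>
    intro P compB d k hPL hBL hI hL hD hB hk _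
    exact ⟨P, d, k, rfl, hPL, hI, hBL, hL, hD, hB, by omega⟩
  | cons uv es ih =>
    intro P compB d k hPL hBL hI hL hD hB hk hes
    by_cases hg : uv.1 ∉ bl ∧ uv.2 ∉ bl
    · obtain ⟨b1, b2, b3, b4⟩ := hes uv List.mem_cons_self hg.1 hg.2
      obtain ⟨P1, hun, hlen1, hI1, hlenB1, hL1, d', hD1, hB1⟩ :=
        pvUnionUB_ok fuel P compB d k uv.1 uv.2 (hBL.trans hPL.symm) hI hL hD hB
          (by simp at hk; omega)
          (by rw [hPL]; exact b1) (by rw [hPL]; exact b2)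
          (by rw [hPL]; exact b3) (by rw [hPL]; exact b4)
      have hstep : pvGB L bl compB uv =
          (if pvGet compB (pvW P.length uv.1) ≠ pvGet compB (pvW P.length uv.2) then
            compB.map (fun c => if c = pvGet compB (pvW P.length uv.2) then pvGet compB (pvW P.length uv.1) else c)
          else compB) := by
        rw [pvGB, if_pos hg, hPL]
      obtain ⟨P', d'', k'', hfold, hlen', hI', hlenB', hL', hD', hB', hk''⟩ :=
        ih P1 (pvGB L bl compB uv) d' (k+1)
          (hlen1.trans hPL) (by rw [hstep]; rw [hlenB1, hBL])
          hI1 (by rw [hstep]; exact hL1) hD1 hB1 (by simp at hk ⊢; omega)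
          (fun w hw h1 h2 => hes w (List.mem_cons_of_mem _ hw) h1 h2)
      refine ⟨P', d'', k'', ?_, hlen', hI', hlenB', hL', hD', hB', by simp at hk'' ⊢; omega⟩
      rw [List.foldl_cons]
      have : pvStepU fuel bl (some P) uv = pvUnionA fuel P uv.1 uv.2 := by
        simp [pvStepU, hg]
      rw [this, hun]
      exact hfold
    · obtain ⟨P', d'', k'', hfold, hlen', hI', hlenB', hL', hD', hB', hk''⟩ :=
        ih P compB d k hPL hBL hI hL hD hB (by simp at hk ⊢; omega)
          (fun w hw h1 h2 => hes w (List.mem_cons_of_mem _ hw) h1 h2)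
      refine ⟨P', d'', k'', ?_, hlen', hI', ?_, ?_, hD', hB', by simp at hk'' ⊢; omega⟩
      · rw [List.foldl_cons]
        have : pvStepU fuel bl (some P) uv = some P := by
          simp [pvStepU, hg]
        rw [this]
        exact hfold
      · rw [List.foldl_cons, pvGB, if_neg hg]
        exact hlenB'
      · rw [List.foldl_cons, pvGB, if_neg hg]
        exact hL'

-- A's blackout fold computes the wrapped count over the final labelling
lemma pvFoldB_ok (fuel L : Nat) (compF : List Int) :
    ∀ (bs : List Int) (P : List Int) (c : Int) (d : Int → Nat) (k : Nat),
    P.length = L → pvInv P → pvLab P (pvGet compF) → pvDec P d → (∀ i, d i ≤ k) → k + 1 < fuel →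
    (∀ b ∈ bs, -(L:Int) ≤ b ∧ b < L) →
    ∃ P', bs.foldl (pvStepB fuel) (some (P, c)) =
      some (P', bs.foldl (fun acc u => if pvGet compF (pvW L u) = 1 then acc + (1:Int) else acc) c) := by
  intro bs
  induction bs with
  | nil => intro P c _ _ _ _ _ _ _ _ _; exact ⟨P, rfl⟩
  | cons b bs ih =>
    intro P c d k hPL hI hL hD hB hk hbs
    obtain ⟨h1, h2⟩ := hbs b List.mem_cons_self
    obtain ⟨P1, r, hfind, hlen1, hI1, hL1, hD1, _, _, hrC, _⟩ :=
      pvFindA_raw (pvGet compF) fuel P d k b hI hL hD hB hk (by rw [hPL]; exact h1) (by rw [hPL]; exact h2)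
    obtain ⟨P', hfold⟩ := ih P1 (c + if r = 1 then (1:Int) else 0) d k (hlen1.trans hPL)
      hI1 hL1 hD1 hB hk (fun b' hb' => hbs b' (List.mem_cons_of_mem _ hb'))
    refine ⟨P', ?_⟩
    rw [List.foldl_cons, List.foldl_cons]
    have hstep : pvStepB fuel (some (P, c)) b = some (P1, c + if r = 1 then (1:Int) else 0) := by
      simp [pvStepB, hfind]
    rw [hstep]
    have hval : (if pvGet compF (pvW L b) = 1 then c + (1:Int) else c) = c + if r = 1 then (1:Int) else 0 := by
      rw [hrC, hPL]
      by_cases hq : pvGet compF (pvW L b) = 1 <;> simp [hq]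
    rw [← hval] at hfold ⊢
    exact hfold

-- B's edge fold never raises under the bounds and computes the wrapped fold pvGB
lemma pvFoldUB_alt (bl : List Int) (L : Nat) :
    ∀ (es : List (Int × Int)) (comp : List Int), comp.length = L →
    (∀ uv ∈ es, uv.1 ∉ bl → uv.2 ∉ bl →
      -(L:Int) ≤ uv.1 ∧ uv.1 < L ∧ -(L:Int) ≤ uv.2 ∧ uv.2 < L) →
    es.foldl (pvStepUB bl) (some comp) = some (es.foldl (pvGB L bl) comp) := by
  intro es
  induction es with
  | nil => intro comp _ _; rfl
  | cons uv es ih =>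
    intro comp hlen hes
    rw [List.foldl_cons, List.foldl_cons]
    have hstep : pvStepUB bl (some comp) uv = some (pvGB L bl comp uv) := by
      by_cases hg : uv.1 ∉ bl ∧ uv.2 ∉ bl
      · obtain ⟨b1, b2, b3, b4⟩ := hes uv List.mem_cons_self hg.1 hg.2
        have hu := pvGet?_wrap comp uv.1 (by rw [hlen]; exact b1) (by rw [hlen]; exact b2)
        have hv := pvGet?_wrap comp uv.2 (by rw [hlen]; exact b3) (by rw [hlen]; exact b4)
        rw [hlen] at hu hv
        simp only [pvStepUB, pvGB, if_pos hg, hu, hv]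
        by_cases hne : pvGet comp (pvW L uv.1) ≠ pvGet comp (pvW L uv.2) <;> simp [hne]
      · simp [pvStepUB, pvGB, hg]
    rw [hstep]
    exact ih (pvGB L bl comp uv)
      (by rw [pvGB]; split
          · split
            · simp [hlen]
            · exact hlen
          · exact hlen)
      (fun w hw h1 h2 => hes w (List.mem_cons_of_mem _ hw) h1 h2)

-- B's blackout fold never raises under the bounds and computes the wrapped count
lemma pvFoldB_alt (L : Nat) (compF : List Int) (hlen : compF.length = L) :
    ∀ (bs : List Int) (c : Int), (∀ b ∈ bs, -(L:Int) ≤ b ∧ b < L) →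
    bs.foldl (pvStepBB compF) (some c) =
      some (bs.foldl (fun acc u => if pvGet compF (pvW L u) = 1 then acc + (1:Int) else acc) c) := by
  intro bs
  induction bs with
  | nil => intro c _; rfl
  | cons b bs ih =>
    intro c hbs
    obtain ⟨h1, h2⟩ := hbs b List.mem_cons_self
    have hg := pvGet?_wrap compF b (by rw [hlen]; exact h1) (by rw [hlen]; exact h2)
    rw [hlen] at hg
    rw [List.foldl_cons, List.foldl_cons]
    have hstep : pvStepBB compF (some c) b =
        some (if pvGet compF (pvW L b) = 1 then c + 1 else c) := by
      simp only [pvStepBB, hg]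
    rw [hstep]
    exact ih _ (fun b' hb' => hbs b' (List.mem_cons_of_mem _ hb'))

-- the freshly built parent array is the identity on its range
lemma pvP0_get (n x : Int) (h : pvInRange (PySem.List.pyRange 0 (n+1) 1) x) :
    pvGet (PySem.List.pyRange 0 (n+1) 1) x = x := by
  obtain ⟨h0, h1⟩ := h
  have hlt : x.toNat < (PySem.List.pyRange 0 (n+1) 1).length := by omega
  unfold pvGet
  rw [List.getD_eq_getElem?_getD, List.getElem?_eq_getElem hlt,
      PySem.List.getElem_pyRange_one]
  simp
  omega

-- ===== VERDICT (by name: the statement is the Claim_ definition above) =====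
theorem solution_spec : Claim_equal_solution := by
  intro n edges blackouts _ hPre
  obtain ⟨hbl, hed⟩ := hPre
  unfold Spec_solution solution solution_alt
  by_cases hn : 0 ≤ n
  · set L : Nat := (PySem.List.pyRange 0 (n+1) 1).length with hLdef
    have hLI : (L:Int) = n + 1 := by
      rw [hLdef, PySem.List.length_pyRange_one]; omega
    have hbounds : ∀ uv ∈ edges, uv.1 ∉ blackouts → uv.2 ∉ blackouts →
        -(L:Int) ≤ uv.1 ∧ uv.1 < L ∧ -(L:Int) ≤ uv.2 ∧ uv.2 < L := by
      intro uv hw h1 h2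
      obtain ⟨a1, a2, a3, a4⟩ := hed uv hw h1 h2
      exact ⟨by omega, by omega, by omega, by omega⟩
    have hblb : ∀ b ∈ blackouts, -(L:Int) ≤ b ∧ b < L := by
      intro b hb
      obtain ⟨c1, c2⟩ := hbl b hb
      exact ⟨by omega, by omega⟩
    have hI0 : pvInv (PySem.List.pyRange 0 (n+1) 1) := by
      intro x hx
      rw [pvP0_get n x hx]; exact hx
    have hL0 : pvLab (PySem.List.pyRange 0 (n+1) 1) (pvGet (PySem.List.pyRange 0 (n+1) 1)) := by
      constructor
      · intro x hx
        rw [pvP0_get n x hx]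
        exact pvP0_get n x hx
      · intro x hx _
        rw [pvP0_get n x hx]
    have hD0 : pvDec (PySem.List.pyRange 0 (n+1) 1) (fun _ => 0) := by
      intro x hx hne; exact absurd (pvP0_get n x hx) hne
    obtain ⟨Pf, d', k', hfoldA, hlenf, hIf, hlenCF, hLf, hDf, hBf, hk'⟩ :=
      pvFoldUB_ok blackouts (L + edges.length + 1) L edges
        (PySem.List.pyRange 0 (n+1) 1) (PySem.List.pyRange 0 (n+1) 1) (fun _ => 0) 0
        rfl rfl hI0 hL0 hD0 (fun _ => le_refl 0) (by omega) hbounds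
    obtain ⟨Pz, hfoldB⟩ :=
      pvFoldB_ok (L + edges.length + 1) L (edges.foldl (pvGB L blackouts) (PySem.List.pyRange 0 (n+1) 1))
        blackouts Pf 0 d' k' hlenf hIf hLf hDf hBf (by omega) hblb
    have hfoldUBalt := pvFoldUB_alt blackouts L edges (PySem.List.pyRange 0 (n+1) 1) rfl hbounds
    have hfoldBBalt := pvFoldB_alt L (edges.foldl (pvGB L blackouts) (PySem.List.pyRange 0 (n+1) 1))
      hlenCF blackouts 0 hblb
    simp only [← hLdef, hfoldA, hfoldB, hfoldUBalt, hfoldBBalt]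
  · have hblnil : blackouts = [] := by
      refine List.eq_nil_iff_forall_not_mem.2 (fun b hb => ?_)
      obtain ⟨c1, c2⟩ := hbl b hb
      omega
    have hednil : edges = [] := by
      refine List.eq_nil_iff_forall_not_mem.2 (fun uv hw => ?_)
      subst hblnil
      obtain ⟨a1, a2, _, _⟩ := hed uv hw (by simp) (by simp)
      omega
    subst hblnil hednil
    simp
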